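-- pv_equiv track=rewrite | github.com/AdvantusAI/AWR | asr_system/utils/madp_utils.py | get_periods_to_analyze
-- ===== SOURCE A (Python) =====
-- from typing import List, Dict, Tuple, Optional, Union
--
-- def get_periods_to_analyze(current_year: int, current_period: int,
--                          periods_to_analyze: int, periodicity: int) -> List[Tuple[int, int]]:
--     """
--     Generate a list of periods to analyze for MADP calculation.
--
--     Args:
--         current_year (int): Current year
--         current_period (int): Current period
--         periods_to_analyze (int): Number of periods to include
--         periodicity (int): Forecasting periodicity (13 for 4-weekly, 52 for weekly)
--
--     Returns:
--         list: List of (year, period) tuples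
--     """
--     periods = []
--     year = current_year
--     period = current_period
--
--     # Start with the previous period (since we're analyzing history)
--     period -= 1
--     if period < 1:
--         period = periodicity
--         year -= 1
--
--     # Generate periods list going backward in time
--     for _ in range(periods_to_analyze):
--         periods.append((year, period))
--
--         period -= 1
--         if period < 1:
--             period = periodicity
--             year -= 1
--
--     return periods
-- ===== SOURCE B (Python) =====
-- def get_periods_to_analyze(current_year: int, current_period: int,
--                            periods_to_analyze: int, periodicity: int):
--     # Build whole year-blocks instead of stepping one period at a time,
--     # emitting from each block only the periods still needed.
--     if periods_to_analyze <= 0: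
--         return []
--     periods = [(current_year, p)
--                for p in range(current_period - 1,
--                               max(current_period - 1 - periods_to_analyze, 0), -1)]
--     year = current_year
--     while len(periods) < periods_to_analyze:
--         year -= 1
--         periods += [(year, p)
--                     for p in range(periodicity,
--                                    max(periodicity - (periods_to_analyze - len(periods)), 0), -1)]
--     return periods
-- ===== Notes on version B (the rewrite author's own statement) =====
-- stated objective: alternative
-- what changed: Replaces the stateful one-period-at-a-time decrement-and-wrap loop by block construction: the tail of the current year, then year-blocks emitted only up to the number of periods still needed; Pre_ excludes periodicity <= 0 with a positive request, where A's wrap pins the period at the non-positive periodicity (no calendar at all) and B's empty year-blocks never fill the request.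
-- outside the precondition, e.g. on get_periods_to_analyze(2020, 1, 2, 0): A returns [(2019, 0), (2018, 0)], B does not finish within the time limit
import Mathlib
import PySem

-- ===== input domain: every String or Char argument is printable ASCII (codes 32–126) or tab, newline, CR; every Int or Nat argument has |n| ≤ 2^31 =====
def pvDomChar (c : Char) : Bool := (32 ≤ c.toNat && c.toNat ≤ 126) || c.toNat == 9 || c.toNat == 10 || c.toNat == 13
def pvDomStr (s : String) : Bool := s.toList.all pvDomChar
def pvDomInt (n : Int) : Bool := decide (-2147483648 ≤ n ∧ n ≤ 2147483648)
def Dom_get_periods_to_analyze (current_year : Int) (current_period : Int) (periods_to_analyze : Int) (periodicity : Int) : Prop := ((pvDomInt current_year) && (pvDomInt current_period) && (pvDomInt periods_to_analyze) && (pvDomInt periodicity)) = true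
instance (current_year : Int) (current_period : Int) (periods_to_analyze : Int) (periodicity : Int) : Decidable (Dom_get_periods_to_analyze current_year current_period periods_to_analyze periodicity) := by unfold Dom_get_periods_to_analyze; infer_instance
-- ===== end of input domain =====

-- B replaces A's one-period-at-a-time decrement-and-wrap loop by block
-- construction: the tail of the current year, then whole year-blocks, each
-- emitted only up to the number of periods still needed (alternative
-- algorithm; same O(n) cost).

-- ===== PORT A =====
-- one loop iteration: append the current (year, period), then decrement with wrap
def pvStepA (periodicity : Int) (st : List (Int × Int) × Int × Int) : List (Int × Int) × Int × Int :=
  let periods := st.1 ++ [(st.2.1, st.2.2)]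
  let period := st.2.2 - 1
  if period < 1 then (periods, st.2.1 - 1, periodicity) else (periods, st.2.1, period)

def get_periods_to_analyze (current_year : Int) (current_period : Int) (periods_to_analyze : Int) (periodicity : Int) : List (Int × Int) :=
  -- period -= 1 ; if period < 1: period = periodicity; year -= 1
  let p0 := current_period - 1
  let st0 : List (Int × Int) × Int × Int :=
    if p0 < 1 then ([], current_year - 1, periodicity) else ([], current_year, p0)
  -- for _ in range(periods_to_analyze): …
  ((PySem.List.pyRange 0 periods_to_analyze 1).foldl (fun st _ => pvStepA periodicity st) st0).1

-- ===== PORT B =====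
-- the while loop of Source B: fuel only makes the recursion total (each pass adds
-- at least one element when 1 ≤ periodicity, so `periods_to_analyze` passes
-- always suffice inside Pre_); state is (year, periods)
def pvLoopB (periodicity : Int) (n : Int) : Nat → Int × List (Int × Int) → List (Int × Int)
  | 0, st => st.2
  | fuel + 1, (year, periods) =>
    if (periods.length : Int) < n then
      -- year -= 1 ; periods += [(year, p) for p in range(periodicity, max(periodicity - (n - len(periods)), 0), -1)]
      pvLoopB periodicity n fuel (year - 1, periods ++
        (PySem.List.pyRange periodicity (max (periodicity - (n - (periods.length : Int))) 0) (-1)).map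
          (fun p => (year - 1, p)))
    else periods

def get_periods_to_analyze_alt (current_year : Int) (current_period : Int) (periods_to_analyze : Int) (periodicity : Int) : List (Int × Int) :=
  if periods_to_analyze ≤ 0 then []
  else
    -- periods = [(current_year, p) for p in range(current_period - 1, max(current_period - 1 - periods_to_analyze, 0), -1)]
    let periods := (PySem.List.pyRange (current_period - 1)
        (max (current_period - 1 - periods_to_analyze) 0) (-1)).map (fun p => (current_year, p))
    -- while len(periods) < periods_to_analyze: …
    pvLoopB periodicity periods_to_analyze periods_to_analyze.toNat (current_year, periods)

-- ===== PRECONDITION & SPEC =====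
-- Pre_ excludes only periodicity ≤ 0 with a positive request: that input denotes
-- no calendar at all, A's wrap there pins every later period at the non-positive
-- periodicity (an artefact of the wrap assignment), and B's year-blocks are
-- empty there, so B never fills the request.
def Pre_get_periods_to_analyze (current_year : Int) (current_period : Int) (periods_to_analyze : Int) (periodicity : Int) : Prop :=
  1 ≤ periodicity ∨ periods_to_analyze ≤ 0
instance (current_year : Int) (current_period : Int) (periods_to_analyze : Int) (periodicity : Int) : Decidable (Pre_get_periods_to_analyze current_year current_period periods_to_analyze periodicity) := by unfold Pre_get_periods_to_analyze; infer_instance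

def pvWitness_get_periods_to_analyze : Int × Int × Int × Int := (2024, 1, 5, 13)

def Spec_get_periods_to_analyze (current_year : Int) (current_period : Int) (periods_to_analyze : Int) (periodicity : Int) (out : List (Int × Int)) : Prop := out = get_periods_to_analyze_alt current_year current_period periods_to_analyze periodicity
instance (current_year : Int) (current_period : Int) (periods_to_analyze : Int) (periodicity : Int) (out : List (Int × Int)) : Decidable (Spec_get_periods_to_analyze current_year current_period periods_to_analyze periodicity out) := by unfold Spec_get_periods_to_analyze; infer_instance

-- ===== CLAIM (what is proved, stated in full; the proofs are below) =====
def Claim_equal_get_periods_to_analyze : Prop := ∀ (current_year : Int) (current_period : Int) (periods_to_analyze : Int) (periodicity : Int), Dom_get_periods_to_analyze current_year current_period periods_to_analyze periodicity → Pre_get_periods_to_analyze current_year current_period periods_to_analyze periodicity → Spec_get_periods_to_analyze current_year current_period periods_to_analyze periodicity (get_periods_to_analyze current_year current_period periods_to_analyze periodicity)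

-- ===== LEMMAS AND PROOFS =====

-- the pure (no accumulator) backward chain A's loop produces
def pvChain (periodicity : Int) : Nat → Int → Int → List (Int × Int)
  | 0, _, _ => []
  | m + 1, y, p =>
      (y, p) :: (if p - 1 < 1 then pvChain periodicity m (y - 1) periodicity
                 else pvChain periodicity m y (p - 1))

theorem pvFoldA_eq_chain (periodicity : Int) (L : List Int) (acc : List (Int × Int)) (y p : Int) :
    (L.foldl (fun st _ => pvStepA periodicity st) (acc, y, p)).1
      = acc ++ pvChain periodicity L.length y p := by
  induction L generalizing acc y p with
  | nil => simp [pvChain]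
  | cons a t ih =>
    rw [List.foldl_cons]
    have hst : pvStepA periodicity (acc, y, p)
        = if p - 1 < 1 then (acc ++ [(y, p)], y - 1, periodicity)
          else (acc ++ [(y, p)], y, p - 1) := by
      simp only [pvStepA]
    rw [hst]
    split_ifs with h <;> · rw [ih]; simp [pvChain, h]

-- one full year-block [P, P-1, …, 1] with year y, and j consecutive such blocks
def pvBlock (P y : Int) : List (Int × Int) :=
  (PySem.List.pyRange P 0 (-1)).map (fun p => (y, p))

def pvBlocks (P : Int) : Nat → Int → List (Int × Int)
  | 0, _ => []
  | j + 1, y => pvBlock P y ++ pvBlocks P j (y - 1)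

theorem pvBlock_length (P y : Int) : (pvBlock P y).length = P.toNat := by
  simp [pvBlock, PySem.List.length_pyRange_neg_one]

theorem pvBlocks_length (P : Int) (j : Nat) (y : Int) :
    (pvBlocks P j y).length = j * P.toNat := by
  induction j generalizing y with
  | zero => simp [pvBlocks]
  | succ k ih => simp [pvBlocks, pvBlock_length, ih]; ring

theorem pvBlocks_append (P : Int) (j d : Nat) (y : Int) :
    pvBlocks P (j + d) y = pvBlocks P j y ++ pvBlocks P d (y - (j : Int)) := by
  induction j generalizing y with
  | zero => simp [pvBlocks]
  | succ k ih =>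
    have : k + 1 + d = (k + d) + 1 := by omega
    rw [this, pvBlocks, pvBlocks, ih (y - 1), List.append_assoc]
    congr 3
    push_cast; ring

-- truncating blocks does not depend on the number of blocks,
-- as long as each side has enough elements
theorem pvTake_blocks (P : Int) (y : Int) (m j1 j2 : Nat)
    (h1 : m ≤ j1 * P.toNat) (h2 : m ≤ j2 * P.toNat) :
    (pvBlocks P j1 y).take m = (pvBlocks P j2 y).take m := by
  rcases le_total j1 j2 with hj | hj
  · obtain ⟨d, rfl⟩ : ∃ d, j2 = j1 + d := ⟨j2 - j1, by omega⟩
    conv_rhs => rw [pvBlocks_append]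
    exact (List.take_append_of_le_length (by rw [pvBlocks_length]; exact h1)).symm
  · obtain ⟨d, rfl⟩ : ∃ d, j1 = j2 + d := ⟨j1 - j2, by omega⟩
    conv_lhs => rw [pvBlocks_append]
    exact List.take_append_of_le_length (by rw [pvBlocks_length]; exact h2)

-- a truncated countdown comprehension is the take-prefix of the full one
theorem pvTake_countdown (f : Int → Int × Int) (a k : Int) (hk : 0 ≤ k) :
    ((PySem.List.pyRange a 0 (-1)).map f).take k.toNat
      = (PySem.List.pyRange a (max (a - k) 0) (-1)).map f := by
  rw [PySem.List.pyRange_neg_one, PySem.List.pyRange_neg_one, ← List.map_take,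
      ← List.map_take, List.take_range,
      show min k.toNat (a - 0).toNat = (a - max (a - k) 0).toNat from by omega]

-- A's chain is the truncation of (countdown from p) ++ (enough full blocks)
theorem pvChain_take (P : Int) (hP : 1 ≤ P) (m : Nat) :
    ∀ (J : Nat), m ≤ J → ∀ (y p : Int), 1 ≤ p →
    pvChain P m y p
      = (((PySem.List.pyRange p 0 (-1)).map (fun q => (y, q))) ++ pvBlocks P J (y - 1)).take m := by
  induction m with
  | zero => intro J _ y p _; simp [pvChain]
  | succ n ih =>
    intro J hJ y p hp
    rw [PySem.List.pyRange_neg_one_cons (by omega), List.map_cons, List.cons_append,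
        List.take_succ_cons, pvChain]
    congr 1
    by_cases hp1 : p - 1 < 1
    · -- p = 1: countdown exhausted, continue in the previous year's full block
      rw [if_pos hp1]
      have hpe : p - 1 = 0 := by omega
      rw [hpe, PySem.List.pyRange_neg_one_eq_nil (by omega), List.map_nil, List.nil_append]
      obtain ⟨J', rfl⟩ : ∃ J', J = J' + 1 := ⟨J - 1, by omega⟩
      rw [pvBlocks, pvBlock, ih J' (by omega) (y - 1) P hP]
    · rw [if_neg hp1, ih J (by omega) y (p - 1) (by omega)]

-- B's while loop appends exactly the still-needed prefix of the block stream
theorem pvLoopB_eq_take (P n : Int) (hP : 1 ≤ P) :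
    ∀ (fuel : Nat) (J : Nat) (year : Int) (periods : List (Int × Int)),
    periods.length ≤ n.toNat →
    n.toNat - periods.length ≤ fuel →
    n.toNat - periods.length ≤ J * P.toNat →
    pvLoopB P n fuel (year, periods)
      = periods ++ (pvBlocks P J (year - 1)).take (n.toNat - periods.length) := by
  intro fuel
  induction fuel with
  | zero =>
    intro J year periods hlen hf _
    have : n.toNat - periods.length = 0 := by omega
    simp [pvLoopB, this]
  | succ f ih =>
    intro J year periods hlen hf hJ
    rw [pvLoopB]
    by_cases hlt : (periods.length : Int) < n
    · rw [if_pos hlt]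
      set r : Nat := n.toNat - periods.length with hr
      have hr1 : 1 ≤ r := by omega
      have hJ1 : 1 ≤ J := by
        by_contra h
        have hJ0 : J = 0 := by omega
        rw [hJ0, Nat.zero_mul] at hJ
        omega
      obtain ⟨J', rfl⟩ : ∃ J', J = J' + 1 := ⟨J - 1, by omega⟩
      by_cases hbig : (r : Int) < P
      · -- partial block: it finishes the request
        have hstop : max (P - (n - (periods.length : Int))) 0 = P - (r : Int) := by omega
        rw [hstop]
        set L : List (Int × Int) :=
          (PySem.List.pyRange P (P - (r : Int)) (-1)).map (fun p => ((year - 1 : Int), p)) with hL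
        have hLlen : L.length = r := by
          rw [hL, List.length_map, PySem.List.length_pyRange_neg_one]; omega
        have hlen' : (periods ++ L).length = n.toNat := by
          rw [List.length_append, hLlen]; omega
        rw [ih J' (year - 1) (periods ++ L) (by omega) (by omega) (by omega), hlen',
            Nat.sub_self, List.take_zero, List.append_nil]
        congr 1
        -- L is the r-prefix of the block stream
        have hblk := pvTake_countdown (fun p => ((year - 1 : Int), p)) P (r : Int) (by omega)
        rw [Int.toNat_natCast, show max (P - (r : Int)) 0 = P - (r : Int) from by omega] at hblk
        rw [hL, ← hblk, pvBlocks,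
            List.take_append_of_le_length (by rw [pvBlock_length]; omega), pvBlock]
      · -- full block, keep looping
        have hstop : max (P - (n - (periods.length : Int))) 0 = 0 := by omega
        rw [hstop]
        have hblk : (PySem.List.pyRange P 0 (-1)).map (fun p => ((year - 1 : Int), p))
            = pvBlock P (year - 1) := rfl
        rw [hblk]
        have hlen' : (periods ++ pvBlock P (year - 1)).length = periods.length + P.toNat := by
          rw [List.length_append, pvBlock_length]
        have hJP := pvBlocks_length P (J' + 1) (year - 1)
        rw [ih J' (year - 1) (periods ++ pvBlock P (year - 1))
              (by rw [hlen']; omega) (by rw [hlen']; omega)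
              (by rw [hlen']
                  have : (J' + 1) * P.toNat = J' * P.toNat + P.toNat := by ring
                  omega),
            hlen', List.append_assoc]
        congr 1
        rw [pvBlocks, List.take_append]
        congr 1
        · exact (List.take_of_length_le (by rw [pvBlock_length]; omega)).symm
        · congr 1
          rw [pvBlock_length]
          omega
    · rw [if_neg hlt]
      have : n.toNat - periods.length = 0 := by omega
      rw [this, List.take_zero, List.append_nil]

-- ===== VERDICT (by name: the statement is the Claim_ definition above) =====
theorem get_periods_to_analyze_spec : Claim_equal_get_periods_to_analyze := by
  intro cy cp n P _ hP
  unfold Spec_get_periods_to_analyze get_periods_to_analyze get_periods_to_analyze_alt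
  by_cases hn : n ≤ 0
  · -- empty request: both sides are []
    rw [if_pos hn, PySem.List.pyRange_one_eq_nil hn]
    dsimp only
    split_ifs <;> rfl
  · have hP1 : (1 : Int) ≤ P := by
      unfold Pre_get_periods_to_analyze at hP; omega
    rw [if_neg hn]
    simp only []
    set m : Nat := n.toNat with hm
    -- B's truncated first segment is the take-prefix of A's full countdown
    set firstA : List (Int × Int) :=
      (PySem.List.pyRange (cp - 1) 0 (-1)).map (fun p => (cy, p)) with hfA
    have hfirst : (PySem.List.pyRange (cp - 1) (max (cp - 1 - n) 0) (-1)).map (fun p => (cy, p))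
        = firstA.take m := by
      rw [hfA, pvTake_countdown _ (cp - 1) n (by omega)]
    have hlenA : firstA.length = (cp - 1).toNat := by
      rw [hfA, List.length_map, PySem.List.length_pyRange_neg_one]; omega
    rw [hfirst, pvLoopB_eq_take P n hP1 n.toNat m cy (firstA.take m)
          (by rw [List.length_take]; omega)
          (by rw [List.length_take]; omega)
          (by rw [List.length_take]
              have h1P : 1 ≤ P.toNat := by omega
              calc m - min m firstA.length ≤ m := by omega
                _ ≤ m * P.toNat := Nat.le_mul_of_pos_right _ (by omega))]
    rw [PySem.List.pyRange_one, Int.sub_zero]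
    split_ifs with hwrap
    · -- current_period ≤ 1 : pre-loop wrap to (cy - 1, P); firstA is empty
      have hfe : firstA = [] := by
        rw [hfA, PySem.List.pyRange_neg_one_eq_nil (by omega), List.map_nil]
      rw [pvFoldA_eq_chain, List.length_map, List.length_range, List.nil_append,
          pvChain_take P hP1 m m le_rfl (cy - 1) P hP1]
      rw [hfe]
      simp only [List.take_nil, List.nil_append, List.length_nil, Nat.sub_zero]
      have hblk : ((PySem.List.pyRange P 0 (-1)).map (fun q => ((cy - 1 : Int), q)))
            ++ pvBlocks P m (cy - 1 - 1) = pvBlocks P (m + 1) (cy - 1) := by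
        rw [pvBlocks, pvBlock]
      rw [hblk]
      apply pvTake_blocks
      · have h1P : 1 ≤ P.toNat := by omega
        calc m ≤ (m + 1) * 1 := by omega
          _ ≤ (m + 1) * P.toNat := Nat.mul_le_mul_left _ (by omega)
      · have h1P : 1 ≤ P.toNat := by omega
        calc m ≤ m * 1 := by omega
          _ ≤ m * P.toNat := Nat.mul_le_mul_left _ (by omega)
    · -- current_period ≥ 2 : countdown from cp - 1, then full blocks
      rw [pvFoldA_eq_chain, List.length_map, List.length_range, List.nil_append,
          pvChain_take P hP1 m m le_rfl cy (cp - 1) (by omega), ← hfA,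
          List.take_append, List.length_take]
      congr 2
      rw [← hm]
      omega
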